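-- pv_equiv track=rewrite | github.com/felipesickbp/pilot | backend/app/services/apply_mapping.py | _find_amount_fallback
-- ===== SOURCE A (Python) =====
-- from typing import Any, Dict, List, Optional, Tuple
--
-- def _find_amount_fallback(headers_norm: List[str]) -> List[str]:
--     candidates: List[str] = []
--     for h in headers_norm:
--         if any(k in h for k in ("betrag_detail", "einzelbetrag", "betrag", "amount", "summe", "total", "gutschrift", "lastschrift")):
--             candidates.append(h)
--
--     def score(x: str) -> int:
--         if "betrag_detail" in x:
--             return 0
--         if "einzelbetrag" in x:
--             return 1
--         if x in ("betrag", "amount"):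
--             return 2
--         return 3
--
--     return sorted(list(dict.fromkeys(candidates)), key=score)
-- ===== SOURCE B (Python) =====
-- from typing import List
--
-- _KEYWORDS = ("betrag_detail", "einzelbetrag", "betrag", "amount", "summe", "total", "gutschrift", "lastschrift")
--
-- def _score(x: str) -> int:
--     if "betrag_detail" in x:
--         return 0
--     if "einzelbetrag" in x:
--         return 1
--     if x in ("betrag", "amount"):
--         return 2
--     return 3
--
-- def _find_amount_fallback(headers_norm: List[str]) -> List[str]:
--     # one pass: dedup while bucketing by priority class; no sort needed
--     seen = set()
--     buckets = ([], [], [], [])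
--     for h in headers_norm:
--         if h not in seen and any(k in h for k in _KEYWORDS):
--             seen.add(h)
--             buckets[_score(h)].append(h)
--     return buckets[0] + buckets[1] + buckets[2] + buckets[3]
-- ===== Notes on version B (the rewrite author's own statement) =====
-- stated objective: alternative
-- what changed: Replaces collect-then-dedup-then-stable-sort with a single pass that deduplicates via a seen set and appends each matching header to one of four fixed priority buckets, returning their concatenation.
import Mathlib
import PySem

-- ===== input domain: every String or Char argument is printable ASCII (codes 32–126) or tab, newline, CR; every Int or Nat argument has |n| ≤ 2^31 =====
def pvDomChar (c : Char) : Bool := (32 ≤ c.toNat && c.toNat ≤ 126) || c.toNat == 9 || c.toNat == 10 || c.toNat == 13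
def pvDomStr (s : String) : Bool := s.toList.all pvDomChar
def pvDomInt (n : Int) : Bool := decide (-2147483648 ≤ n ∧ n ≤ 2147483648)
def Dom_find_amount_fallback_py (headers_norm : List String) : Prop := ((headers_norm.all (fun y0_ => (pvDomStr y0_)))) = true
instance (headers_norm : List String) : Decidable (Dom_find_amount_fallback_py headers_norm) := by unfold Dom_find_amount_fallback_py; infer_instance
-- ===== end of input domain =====

-- B replaces collect→dedup→stable-sort with a single pass that dedups via a seen set and
-- appends each matching header to one of four fixed priority buckets (concatenated at the end).


-- ===== PORT A =====
-- shared helpers (both Pythons test the same keyword tuple and the same score function)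
def pvKeywords : List String :=
  ["betrag_detail", "einzelbetrag", "betrag", "amount", "summe", "total", "gutschrift", "lastschrift"]

def pvMatches (h : String) : Bool := pvKeywords.any (fun k => PySem.Str.isIn k h)

def pvScore (x : String) : Int :=
  if PySem.Str.isIn "betrag_detail" x then 0
  else if PySem.Str.isIn "einzelbetrag" x then 1
  else if x == "betrag" || x == "amount" then 2
  else 3

def find_amount_fallback_py (headers_norm : List String) : List String :=
  let candidates := headers_norm.foldl (fun acc h => if pvMatches h then acc ++ [h] else acc) []
  PySem.List.sorted (PySem.List.dedup candidates) pvScore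

-- ===== PORT B =====
def pvBState : Type := PySem.Set String × List String × List String × List String × List String

def pvBStep (st : pvBState) (h : String) : pvBState :=
  let (seen, b0, b1, b2, b3) := st
  if !(PySem.Set.contains seen h) && pvMatches h then
    let seen' := PySem.Set.add seen h
    let s := pvScore h
    if s == 0 then (seen', b0 ++ [h], b1, b2, b3)
    else if s == 1 then (seen', b0, b1 ++ [h], b2, b3)
    else if s == 2 then (seen', b0, b1, b2 ++ [h], b3)
    else (seen', b0, b1, b2, b3 ++ [h])
  else st

def find_amount_fallback_py_alt (headers_norm : List String) : List String :=
  let st := headers_norm.foldl pvBStep (PySem.Set.empty, [], [], [], [])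
  st.2.1 ++ st.2.2.1 ++ st.2.2.2.1 ++ st.2.2.2.2

-- ===== PRECONDITION & SPEC =====
def Spec_find_amount_fallback_py (headers_norm : List String) (out : List String) : Prop := out = find_amount_fallback_py_alt headers_norm
instance (headers_norm : List String) (out : List String) : Decidable (Spec_find_amount_fallback_py headers_norm out) := by unfold Spec_find_amount_fallback_py; infer_instance

-- ===== CLAIM (what is proved, stated in full; the proofs are below) =====
def Claim_equal_find_amount_fallback_py : Prop := ∀ (headers_norm : List String), Dom_find_amount_fallback_py headers_norm → Spec_find_amount_fallback_py headers_norm (find_amount_fallback_py headers_norm)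

-- ===== LEMMAS AND PROOFS =====

-- the four-bucket concatenation both sides compute
def pvF (l : List String) : List String :=
  l.filter (fun x => pvScore x == 0) ++ l.filter (fun x => pvScore x == 1) ++
  l.filter (fun x => pvScore x == 2) ++ l.filter (fun x => pvScore x == 3)

theorem pvScore_cases (x : String) : pvScore x = 0 ∨ pvScore x = 1 ∨ pvScore x = 2 ∨ pvScore x = 3 := by
  unfold pvScore; split_ifs <;> simp

theorem candidates_eq_filter (l : List String) (acc : List String) :
    l.foldl (fun acc h => if pvMatches h then acc ++ [h] else acc) acc = acc ++ l.filter pvMatches := by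
  induction l generalizing acc with
  | nil => simp
  | cons h t ih =>
    by_cases hm : pvMatches h <;> simp [List.foldl_cons, hm, ih]

theorem insertBy_skip {α : Type} (before : α → α → Bool) (x : α) (l1 l2 : List α)
    (h : ∀ y ∈ l1, before x y = false) :
    PySem.List.insertBy before x (l1 ++ l2) = l1 ++ PySem.List.insertBy before x l2 := by
  induction l1 with
  | nil => simp
  | cons a t ih =>
    have ha : before x a = false := h a (by simp)
    simp [PySem.List.insertBy, ha, ih (fun y hy => h y (by simp [hy]))]

theorem insertBy_front {α : Type} (before : α → α → Bool) (x : α) (l : List α)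
    (h : ∀ y ∈ l, before x y = true) :
    PySem.List.insertBy before x l = x :: l := by
  cases l with
  | nil => simp [PySem.List.insertBy]
  | cons a t => simp [PySem.List.insertBy, h a (by simp)]

theorem ins_pvF (x : String) (l : List String) :
    PySem.List.insertBy (fun a b => decide (pvScore a < pvScore b)) x (pvF l) = pvF (l ++ [x]) := by
  have hf : ∀ (i : Int) (y : String), y ∈ l.filter (fun x => pvScore x == i) → pvScore y = i := by
    intro i y hy
    simp [List.mem_filter] at hy
    exact hy.2
  have hskip : ∀ (i : Int), pvScore x ≥ i →
      ∀ y ∈ l.filter (fun x => pvScore x == i), (decide (pvScore x < pvScore y)) = false := by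
    intro i hi y hy
    have := hf i y hy
    simp [this]; omega
  have hfront : ∀ (i : Int), pvScore x < i →
      ∀ y ∈ l.filter (fun x => pvScore x == i), (decide (pvScore x < pvScore y)) = true := by
    intro i hi y hy
    have := hf i y hy
    simp [this]; omega
  rcases pvScore_cases x with hs | hs | hs | hs <;>
    simp only [pvF, List.filter_append, List.filter_cons, List.filter_nil, hs] <;>
    norm_num
  · rw [insertBy_skip _ _ _ _ (hskip 0 (by omega)), insertBy_front]
    intro y hy
    simp only [List.mem_append] at hy
    rcases hy with hy | hy | hy
    exacts [hfront 1 (by omega) y hy, hfront 2 (by omega) y hy, hfront 3 (by omega) y hy]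
  · rw [insertBy_skip _ _ _ _ (hskip 0 (by omega)), insertBy_skip _ _ _ _ (hskip 1 (by omega)),
      insertBy_front]
    intro y hy
    simp only [List.mem_append] at hy
    rcases hy with hy | hy
    exacts [hfront 2 (by omega) y hy, hfront 3 (by omega) y hy]
  · rw [insertBy_skip _ _ _ _ (hskip 0 (by omega)), insertBy_skip _ _ _ _ (hskip 1 (by omega)),
      insertBy_skip _ _ _ _ (hskip 2 (by omega)), insertBy_front]
    intro y hy
    exact hfront 3 (by omega) y hy
  · rw [PySem.List.insertBy_of_forall_not_before]
    · simp
    · intro y hy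
      simp only [List.mem_append] at hy
      rcases hy with hy | hy | hy | hy
      exacts [hskip 0 (by omega) y hy, hskip 1 (by omega) y hy, hskip 2 (by omega) y hy,
        hskip 3 (by omega) y hy]

theorem foldl_ins_eq_pvF (l : List String) :
    l.foldl (fun acc x => PySem.List.insertBy (fun a b => decide (pvScore a < pvScore b)) x acc) []
      = pvF l := by
  induction l using List.reverseRecOn with
  | nil => rfl
  | append_singleton p x ih => rw [List.foldl_append, List.foldl_cons, List.foldl_nil, ih, ins_pvF]

theorem sorted_eq_pvF (l : List String) : PySem.List.sorted l pvScore = pvF l := by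
  rw [PySem.List.sorted_eq_foldl_insertBy, foldl_ins_eq_pvF]

-- the invariant state of B's fold after the candidate list c has been processed
def pvState (c : List String) : pvBState :=
  (PySem.Set.ofList c,
    (PySem.Set.ofList c).filter (fun x => pvScore x == 0),
    (PySem.Set.ofList c).filter (fun x => pvScore x == 1),
    (PySem.Set.ofList c).filter (fun x => pvScore x == 2),
    (PySem.Set.ofList c).filter (fun x => pvScore x == 3))

theorem ofList_append_singleton (c : List String) (h : String) :
    PySem.Set.ofList (c ++ [h]) = PySem.Set.add (PySem.Set.ofList c) h := by
  rw [PySem.Set.ofList_eq_foldl, List.foldl_append, ← PySem.Set.ofList_eq_foldl, List.foldl_cons,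
    List.foldl_nil]

theorem bstep_state (c : List String) (h : String) :
    pvBStep (pvState c) h = pvState (c ++ (if pvMatches h then [h] else [])) := by
  by_cases hc : h ∈ c
  · have hadd : PySem.Set.ofList (c ++ [h]) = PySem.Set.ofList c := by
      rw [ofList_append_singleton]
      simp [PySem.Set.add, hc]
    by_cases hm : pvMatches h <;> simp [pvBStep, pvState, hc, hm, hadd]
  by_cases hm : pvMatches h
  · have hadd : PySem.Set.ofList (c ++ [h]) = PySem.Set.ofList c ++ [h] := by
      rw [ofList_append_singleton]
      simp [PySem.Set.add, hc]
    rcases pvScore_cases h with hs | hs | hs | hs <;>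
      simp [pvBStep, pvState, hc, hm, PySem.Set.add, hs, hadd]
  · simp [pvBStep, pvState, hm, hc]

theorem bfold_inv (l : List String) : ∀ (c : List String),
    l.foldl pvBStep (pvState c) = pvState (c ++ l.filter pvMatches) := by
  induction l with
  | nil => simp
  | cons h t ih =>
    intro c
    rw [List.foldl_cons, bstep_state, ih, List.filter_cons]
    by_cases hm : pvMatches h <;> simp [hm]

-- ===== VERDICT (by name: the statement is the Claim_ definition above) =====
theorem find_amount_fallback_py_spec : Claim_equal_find_amount_fallback_py := by
  intro headers _
  show find_amount_fallback_py headers = find_amount_fallback_py_alt headers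
  unfold find_amount_fallback_py find_amount_fallback_py_alt
  rw [candidates_eq_filter]
  have hinit : ((PySem.Set.empty, [], [], [], []) : pvBState) = pvState [] := by
    simp [pvState, PySem.Set.empty, PySem.Set.ofList]
  rw [hinit, bfold_inv]
  simp only [List.nil_append, sorted_eq_pvF, PySem.List.dedup_eq_ofList]
  simp [pvF, pvState]
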